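-- pv_equiv track=rewrite | github.com/bacey/barnus | border.py | border2
-- ===== SOURCE A (Python) =====
-- lista = [0, 1, 2, 2, 3]
--
-- def border2(border):
--     new_list = []
--     item_found = False
--     for item in lista:
--         if item == border:
--             item_found = True
--         if item_found:
--             new_list.append(item)
--
--     return new_list
-- ===== SOURCE B (Python) =====
-- lista = [0, 1, 2, 2, 3]
--
-- def border2(border):
--     if border in lista:
--         return lista[lista.index(border):]
--     return []
-- ===== Notes on version B (the rewrite author's own statement) =====
-- stated objective: simpler
-- what changed: Replaces the flag-carrying element-by-element accumulation loop with locating the first occurrence via index() and returning the contiguous suffix slice (empty list if absent).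
import Mathlib
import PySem

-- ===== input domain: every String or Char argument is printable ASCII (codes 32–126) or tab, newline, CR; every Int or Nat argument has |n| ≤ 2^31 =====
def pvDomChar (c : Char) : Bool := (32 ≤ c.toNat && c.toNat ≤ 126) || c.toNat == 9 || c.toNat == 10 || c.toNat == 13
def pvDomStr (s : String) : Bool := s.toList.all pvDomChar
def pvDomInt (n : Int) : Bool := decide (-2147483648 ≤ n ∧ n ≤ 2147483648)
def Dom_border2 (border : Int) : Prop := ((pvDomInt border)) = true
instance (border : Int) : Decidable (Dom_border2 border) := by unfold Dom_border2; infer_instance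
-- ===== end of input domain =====

-- B replaces A's flag-and-append loop by index()+slice; same return values for all inputs.
-- ===== PORT A =====
def pvLista : List Int := [0, 1, 2, 2, 3]

def border2 (border : Int) : List Int :=
  let r := pvLista.foldl (fun (st : List Int × Bool) item =>
    let found := if item == border then true else st.2
    (if found then st.1 ++ [item] else st.1, found)) ([], false)
  r.1

-- ===== PORT B =====
def border2_alt (border : Int) : List Int :=
  if pvLista.contains border then
    match PySem.List.index? pvLista border with
    | some i => PySem.List.slice pvLista (some (i : Int)) none
    | none => []
  else []

-- ===== PRECONDITION & SPEC =====
def Spec_border2 (border : Int) (out : List Int) : Prop := out = border2_alt border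
instance (border : Int) (out : List Int) : Decidable (Spec_border2 border out) := by unfold Spec_border2; infer_instance

-- ===== CLAIM (what is proved, stated in full; the proofs are below) =====
def Claim_equal_border2 : Prop := ∀ (border : Int), Dom_border2 border → Spec_border2 border (border2 border)

-- ===== LEMMAS AND PROOFS =====

-- ===== VERDICT (by name: the statement is the Claim_ definition above) =====
theorem border2_spec : Claim_equal_border2 := by
  intro border _
  unfold Spec_border2
  by_cases h0 : border = 0
  · subst h0; simp [border2, border2_alt, pvLista, PySem.List.index?, PySem.List.slice, List.idxOf?, List.findIdx?, List.findIdx?.go]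
  · by_cases h1 : border = 1
    · subst h1; simp [border2, border2_alt, pvLista, PySem.List.index?, PySem.List.slice, List.idxOf?, List.findIdx?, List.findIdx?.go]
    · by_cases h2 : border = 2
      · subst h2; simp [border2, border2_alt, pvLista, PySem.List.index?, PySem.List.slice, List.idxOf?, List.findIdx?, List.findIdx?.go]
      · by_cases h3 : border = 3
        · subst h3; simp [border2, border2_alt, pvLista, PySem.List.index?, PySem.List.slice, List.idxOf?, List.findIdx?, List.findIdx?.go]
        · simp [border2, border2_alt, pvLista, List.foldl,
            (show ¬((0:Int) = border) from fun h => h0 h.symm),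
            (show ¬((1:Int) = border) from fun h => h1 h.symm),
            (show ¬((2:Int) = border) from fun h => h2 h.symm),
            (show ¬((3:Int) = border) from fun h => h3 h.symm)]
          intro h; rcases h with h|h|h|h <;> simp_all
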